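-- pv_equiv track=rewrite | github.com/AumitLeon/advent-of-code | 2025/day_04/solution.py | get_total_possible_accessible_rolls_removed
-- ===== SOURCE A (Python) =====
-- def get_adjacent_positions(row_idx: int, column_idx: int) -> list[tuple[int, int]]:
--     return [
--         (row_idx + 1, column_idx),  # Below
--         (row_idx - 1, column_idx),  # Above
--         (row_idx, column_idx + 1),  # Right
--         (row_idx, column_idx - 1),  # Left
--         (row_idx - 1, column_idx - 1),  # Top left
--         (row_idx - 1, column_idx + 1),  # Top right
--         (row_idx + 1, column_idx + 1),  # Bottom right
--         (row_idx + 1, column_idx - 1),  # Bottom left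
--     ]
--
-- def is_valid_position(row: int, col: int, matrix: list[list[str]]) -> bool:
--     matrix_row_dimension = len(matrix)
--     matrix_col_dimension = len(matrix[0])
--     if 0 > col or col > matrix_col_dimension - 1 or 0 > row or row > matrix_row_dimension - 1:
--         return False
--     else:
--         return True
--
-- def get_accessible_rolls(
--     matrix: list[list[str]], roll_coords: list[tuple[int, int]]
-- ) -> list[tuple[int, int]]:
--     count = 0
--     accessible_roll_coords = []
--     set_roll_coords = set(roll_coords)
--     for row, col in roll_coords:
--         adjacent_rolls = 0
--         for adjacent_row, adjacent_col in get_adjacent_positions(row, col):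
--             if is_valid_position(adjacent_row, adjacent_col, matrix):
--                 if (adjacent_row, adjacent_col) in set_roll_coords:
--                     adjacent_rolls += 1
--         if adjacent_rolls < 4:
--             accessible_roll_coords.append((row, col))
--             count += 1
--     return accessible_roll_coords
--
-- def get_total_possible_accessible_rolls_removed(
--     matrix: list[list[str]], roll_coords: list[tuple[int, int]]
-- ) -> int:
--     rolls_removed = 0
--     accessible_roll_coords = get_accessible_rolls(matrix, roll_coords)
--     while len(accessible_roll_coords) > 0:
--         # mark the currently accessible rolls as x's.
--         for row, col in accessible_roll_coords:
--             matrix[row][col] = "."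
--             roll_coords.remove((row, col))
--             rolls_removed += 1
--         accessible_roll_coords = get_accessible_rolls(matrix, roll_coords)
--
--     return rolls_removed
-- ===== SOURCE B (Python) =====
-- # B: peeling on a coordinate set (insertion-ordered dict): delete a roll the moment it has
-- # <4 live in-grid neighbours, marking it "." in the matrix like A does, sweeping until a
-- # whole sweep deletes nothing; then count removed occurrences.
-- # (Return-value equivalence only: B performs A's matrix marking but, unlike A, does not
-- # drain roll_coords.)
-- _DIRS = [(1, 0), (-1, 0), (0, 1), (0, -1), (-1, -1), (-1, 1), (1, 1), (1, -1)]
--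
--
-- def get_total_possible_accessible_rolls_removed(matrix, roll_coords):
--     rows = len(matrix)
--     cols = len(matrix[0]) if matrix else 0
--     live = dict.fromkeys(roll_coords)
--     changed = True
--     while changed:
--         changed = False
--         for p in list(live):
--             n = 0
--             for d in _DIRS:
--                 q = (p[0] + d[0], p[1] + d[1])
--                 if 0 <= q[0] < rows and 0 <= q[1] < cols and q in live:
--                     n += 1
--             if n < 4:
--                 del live[p]
--                 matrix[p[0]][p[1]] = "."
--                 changed = True
--     return sum(1 for p in roll_coords if p not in live)
-- ===== Notes on version B (the rewrite author's own statement) =====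
-- stated objective: alternative
-- what changed: Replaces A's round-based peeling (rebuild the coordinate set, collect a batch of accessible rolls, then list.remove each of them at O(n) apiece) by a single ordered-set sweep that deletes a roll the moment it has fewer than 4 live in-grid neighbours and repeats until a sweep deletes nothing, counting removed occurrences at the end; correctness rests on order-independence of 4-core peeling.
import Mathlib
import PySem

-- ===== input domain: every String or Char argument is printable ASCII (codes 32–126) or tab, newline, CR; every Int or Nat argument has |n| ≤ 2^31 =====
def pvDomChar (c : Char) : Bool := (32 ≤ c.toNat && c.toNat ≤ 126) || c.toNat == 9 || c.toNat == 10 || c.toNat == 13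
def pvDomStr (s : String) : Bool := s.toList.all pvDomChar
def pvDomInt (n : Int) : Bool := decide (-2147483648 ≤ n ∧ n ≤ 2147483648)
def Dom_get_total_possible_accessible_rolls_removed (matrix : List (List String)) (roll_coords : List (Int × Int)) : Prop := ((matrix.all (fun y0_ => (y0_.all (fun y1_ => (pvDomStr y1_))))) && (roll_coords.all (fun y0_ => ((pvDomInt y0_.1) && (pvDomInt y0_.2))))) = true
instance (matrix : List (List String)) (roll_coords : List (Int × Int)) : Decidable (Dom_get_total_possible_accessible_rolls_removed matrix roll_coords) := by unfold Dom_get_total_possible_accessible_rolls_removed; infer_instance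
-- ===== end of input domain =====

-- B replaces A's round-based "rebuild set / collect batch / list.remove each" peeling by a single
-- ordered-set sweep deleting a roll the moment it has <4 live in-grid neighbours (alternative
-- algorithm, same cost). EQUIVALENCE IS ABOUT THE RETURN VALUE ONLY: B performs A's matrix
-- marking ("." on each removed roll) but, unlike A, does not drain roll_coords in place.

-- ===== PORT A =====
def get_adjacent_positions (row_idx column_idx : Int) : List (Int × Int) :=
  [(row_idx + 1, column_idx), (row_idx - 1, column_idx), (row_idx, column_idx + 1),
   (row_idx, column_idx - 1), (row_idx - 1, column_idx - 1), (row_idx - 1, column_idx + 1),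
   (row_idx + 1, column_idx + 1), (row_idx + 1, column_idx - 1)]

def is_valid_position (row col : Int) (matrix : List (List String)) : Bool :=
  let matrix_row_dimension : Int := matrix.length
  -- len(matrix[0]): Python raises IndexError on an empty matrix; is_valid_position is only
  -- reached with roll_coords ≠ [], and Pre_ then guarantees matrix ≠ [], so headD is exact there.
  let matrix_col_dimension : Int := (matrix.headD []).length
  if 0 > col || col > matrix_col_dimension - 1 || 0 > row || row > matrix_row_dimension - 1 then
    false
  else
    true

def get_accessible_rolls (matrix : List (List String)) (roll_coords : List (Int × Int)) :
    List (Int × Int) :=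
  let set_roll_coords := PySem.Set.ofList roll_coords
  roll_coords.foldl (fun accessible_roll_coords p =>
    let adjacent_rolls : Int :=
      (get_adjacent_positions p.1 p.2).foldl (fun adjacent_rolls q =>
        if is_valid_position q.1 q.2 matrix then
          (if PySem.Set.contains set_roll_coords q then adjacent_rolls + 1 else adjacent_rolls)
        else adjacent_rolls) 0
    if adjacent_rolls < 4 then accessible_roll_coords ++ [p] else accessible_roll_coords) []

-- one iteration of "for row, col in accessible_roll_coords": mark '.', remove the coord, count.
-- pyGet?/remove? return none exactly where Python would raise (IndexError / ValueError);
-- under Pre_ this never happens, the .getD keeps the port total.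
def a_removal_step (st : List (List String) × List (Int × Int) × Int) (p : Int × Int) :
    List (List String) × List (Int × Int) × Int :=
  (PySem.List.pySetD st.1 p.1
      (PySem.List.pySetD ((PySem.List.pyGet? st.1 p.1).getD []) p.2 "."),
   (PySem.List.remove? st.2.1 p).getD st.2.1,
   st.2.2 + 1)

-- the while-loop; fuel = roll_coords.length + 1 suffices (each pass removes ≥ 1 coord)
def a_loop : Nat → List (List String) → List (Int × Int) → Int → Int
  | 0, _, _, rolls_removed => rolls_removed
  | fuel + 1, matrix, roll_coords, rolls_removed =>
    let accessible := get_accessible_rolls matrix roll_coords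
    if accessible.length > 0 then
      let st := accessible.foldl a_removal_step (matrix, roll_coords, rolls_removed)
      a_loop fuel st.1 st.2.1 st.2.2
    else rolls_removed

def get_total_possible_accessible_rolls_removed (matrix : List (List String))
    (roll_coords : List (Int × Int)) : Int :=
  a_loop (roll_coords.length + 1) matrix roll_coords 0

-- ===== PORT B =====
def b_dirs : List (Int × Int) :=
  [(1, 0), (-1, 0), (0, 1), (0, -1), (-1, -1), (-1, 1), (1, 1), (1, -1)]

-- visiting p during a sweep: count live in-grid neighbours; if fewer than 4, delete p at once
-- and mark it "." in the matrix (A's marking; pyGet?/pySetD are none/no-op exactly where the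
-- Python assignment raises IndexError, which Pre_ excludes).
-- 'del live[p]': p is present at its turn (the snapshot is duplicate-free and only p's own
-- visit deletes p), so List.erase is exact for it.
def b_visit (rows cols : Int) (st : (List (Int × Int) × Bool) × List (List String))
    (p : Int × Int) : (List (Int × Int) × Bool) × List (List String) :=
  let n : Int := b_dirs.foldl (fun n d =>
    if decide (0 ≤ p.1 + d.1) && decide (p.1 + d.1 < rows) && decide (0 ≤ p.2 + d.2) &&
        decide (p.2 + d.2 < cols) && st.1.1.contains (p.1 + d.1, p.2 + d.2) then n + 1 else n) 0
  if n < 4 then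
    ((st.1.1.erase p, true),
      PySem.List.pySetD st.2 p.1
        (PySem.List.pySetD ((PySem.List.pyGet? st.2 p.1).getD []) p.2 "."))
  else st

-- 'while changed': fuel = (initial length) + 1 suffices (a sweep that sets changed shrinks live)
def b_sweep (rows cols : Int) : Nat → List (Int × Int) → List (List String) →
    List (Int × Int) × List (List String)
  | 0, live, m => (live, m)
  | fuel + 1, live, m =>
    let st := live.foldl (b_visit rows cols) ((live, false), m)
    if st.1.2 then b_sweep rows cols fuel st.1.1 st.2 else (st.1.1, st.2)

def get_total_possible_accessible_rolls_removed_alt (matrix : List (List String))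
    (roll_coords : List (Int × Int)) : Int :=
  let rows : Int := matrix.length
  let cols : Int := (matrix.headD []).length  -- 'len(matrix[0]) if matrix else 0'
  let res := b_sweep rows cols (roll_coords.length + 1) (PySem.List.dedup roll_coords) matrix
  roll_coords.foldl (fun s p => if res.1.contains p then s else s + 1) 0

-- ===== PRECONDITION & SPEC =====
-- Pre_ keeps exactly the inputs on which every roll coordinate is a valid Python index into
-- matrix (negative wraparound included).  Outside it A raises IndexError as soon as such a roll
-- becomes removable; whether that moment is ever reached depends on the peeling dynamics (a roll
-- pinned in a stable cluster past the end of a short row is never assigned), and in that residual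
-- returning case A's count equals B's anyway — see the cite in claim.json.
def Pre_get_total_possible_accessible_rolls_removed (matrix : List (List String))
    (roll_coords : List (Int × Int)) : Prop :=
  ∀ p ∈ roll_coords, -(matrix.length : Int) ≤ p.1 ∧ p.1 < (matrix.length : Int) ∧
    -((matrix.getD (if p.1 < 0 then p.1 + matrix.length else p.1).toNat []).length : Int) ≤ p.2 ∧
    p.2 < ((matrix.getD (if p.1 < 0 then p.1 + matrix.length else p.1).toNat []).length : Int)

instance (matrix : List (List String)) (roll_coords : List (Int × Int)) :
    Decidable (Pre_get_total_possible_accessible_rolls_removed matrix roll_coords) := by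
  unfold Pre_get_total_possible_accessible_rolls_removed; infer_instance

def pvWitness_get_total_possible_accessible_rolls_removed :
    List (List String) × (List (Int × Int)) :=
  ([["@", "@"], ["@", "@"]], [(0, 0), (1, 1), (0, 1)])

def Spec_get_total_possible_accessible_rolls_removed (matrix : List (List String)) (roll_coords : List (Int × Int)) (out : Int) : Prop := out = get_total_possible_accessible_rolls_removed_alt matrix roll_coords
instance (matrix : List (List String)) (roll_coords : List (Int × Int)) (out : Int) : Decidable (Spec_get_total_possible_accessible_rolls_removed matrix roll_coords out) := by unfold Spec_get_total_possible_accessible_rolls_removed; infer_instance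

-- ===== CLAIM (what is proved, stated in full; the proofs are below) =====
def Claim_equal_get_total_possible_accessible_rolls_removed : Prop := ∀ (matrix : List (List String)) (roll_coords : List (Int × Int)), Dom_get_total_possible_accessible_rolls_removed matrix roll_coords → Pre_get_total_possible_accessible_rolls_removed matrix roll_coords → Spec_get_total_possible_accessible_rolls_removed matrix roll_coords (get_total_possible_accessible_rolls_removed matrix roll_coords)

-- ===== LEMMAS AND PROOFS =====

-- The common abstraction: peeling a set of coordinates.  Everything below is stated through
-- MEMBERSHIP only, so it applies to A's occurrence lists and B's duplicate-free lists alike.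

def nbrs (p : Int × Int) : List (Int × Int) := get_adjacent_positions p.1 p.2

-- "the position is inside the R×C grid" — the test both programs apply to a neighbour
def validRC (R C : Int) (q : Int × Int) : Bool :=
  !(0 > q.2 || q.2 > C - 1 || 0 > q.1 || q.1 > R - 1)

def degc (R C : Int) (S : List (Int × Int)) (p : Int × Int) : Nat :=
  (nbrs p).countP (fun q => validRC R C q && decide (q ∈ S))

def StableS (R C : Int) (S : List (Int × Int)) : Prop := ∀ p ∈ S, 4 ≤ degc R C S p

-- one legal peeling step: only coordinates with fewer than 4 neighbours may disappear
def StepS (R C : Int) (S T : List (Int × Int)) : Prop :=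
  (∀ q ∈ T, q ∈ S) ∧ (∀ x ∈ S, x ∉ T → degc R C S x < 4)

def StarS (R C : Int) (S T : List (Int × Int)) : Prop :=
  Relation.ReflTransGen (StepS R C) S T

lemma degc_mono {R C : Int} {U S : List (Int × Int)} (h : ∀ q ∈ U, q ∈ S) (p : Int × Int) :
    degc R C U p ≤ degc R C S p := by
  apply List.countP_mono_left
  intro a _ ha
  simp only [Bool.and_eq_true, decide_eq_true_eq] at *
  exact ⟨ha.1, h a ha.2⟩

lemma star_subset {R C : Int} {S T : List (Int × Int)} (h : StarS R C S T) :
    ∀ q ∈ T, q ∈ S := by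
  induction h with
  | refl => exact fun q hq => hq
  | tail _ h2 ih => exact fun q hq => ih q (h2.1 q hq)

lemma stable_preserved {R C : Int} {U S T : List (Int × Int)} (hU : StableS R C U)
    (hUS : ∀ q ∈ U, q ∈ S) (h : StarS R C S T) : ∀ q ∈ U, q ∈ T := by
  induction h with
  | refl => exact hUS
  | @tail b c _ h2 ih =>
    intro u hu
    by_contra hnot
    have h4 : degc R C b u < 4 := h2.2 u (ih u hu) hnot
    have : 4 ≤ degc R C b u := le_trans (hU u hu) (degc_mono ih u)
    omega

-- the 4-core is order independent: any two stable peeling results coincide as sets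
lemma core_unique {R C : Int} {S1 S2 T1 T2 : List (Int × Int)} (hm : ∀ q, q ∈ S1 ↔ q ∈ S2)
    (h1 : StarS R C S1 T1) (hs1 : StableS R C T1) (h2 : StarS R C S2 T2)
    (hs2 : StableS R C T2) : ∀ q, q ∈ T1 ↔ q ∈ T2 := by
  intro q
  constructor
  · intro hq
    exact stable_preserved hs1 (fun x hx => (hm x).mp (star_subset h1 x hx)) h2 q hq
  · intro hq
    exact stable_preserved hs2 (fun x hx => (hm x).mpr (star_subset h2 x hx)) h1 q hq

-- ---- A-side characterisation ----

lemma lens_head {m1 m2 : List (List String)} (h : m1.map List.length = m2.map List.length) :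
    m1.length = m2.length ∧ (m1.headD []).length = (m2.headD []).length := by
  cases m1 with
  | nil => cases m2 with
    | nil => exact ⟨rfl, rfl⟩
    | cons b bs => simp at h
  | cons a as => cases m2 with
    | nil => simp at h
    | cons b bs =>
      simp only [List.map_cons, List.cons.injEq] at h
      refine ⟨?_, by simpa using h.1⟩
      have := congrArg List.length h.2
      simpa using this

lemma is_valid_eq (m : List (List String)) (q : Int × Int) :
    is_valid_position q.1 q.2 m = validRC (m.length : Int) ((m.headD []).length : Int) q := by
  simp only [is_valid_position, validRC]
  split_ifs with h
  · rw [h]; rfl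
  · rw [Bool.not_eq_true] at h; rw [h]; rfl

lemma accessible_eq_filter (matrix : List (List String)) (rc : List (Int × Int)) :
    get_accessible_rolls matrix rc = rc.filter (fun p =>
      decide (degc (matrix.length : Int) ((matrix.headD []).length : Int) rc p < 4)) := by
  unfold get_accessible_rolls
  have hinner : ∀ p : Int × Int,
      ((get_adjacent_positions p.1 p.2).foldl (fun n q =>
        if is_valid_position q.1 q.2 matrix then
          (if PySem.Set.contains (PySem.Set.ofList rc) q then n + 1 else n)
        else n) (0:Int))
      = (degc (matrix.length : Int) ((matrix.headD []).length : Int) rc p : Int) := by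
    intro p
    have hfun : (fun (n : Int) q =>
        if is_valid_position q.1 q.2 matrix then
          (if PySem.Set.contains (PySem.Set.ofList rc) q then n + 1 else n)
        else n) = (fun (n : Int) q =>
        if validRC (matrix.length : Int) ((matrix.headD []).length : Int) q &&
            PySem.Set.contains (PySem.Set.ofList rc) q then n + 1 else n) := by
      funext n q
      rw [is_valid_eq matrix q]
      generalize validRC (matrix.length : Int) ((matrix.headD []).length : Int) q = v
      cases v
      · simp
      · simp [PySem.Set.contains]
    rw [hfun]
    simp only [PySem.List.foldl_if_add_one (fun q : Int × Int =>
      validRC (matrix.length : Int) ((matrix.headD []).length : Int) q &&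
        PySem.Set.contains (PySem.Set.ofList rc) q)]
    have : (get_adjacent_positions p.1 p.2).countP (fun q =>
        validRC (matrix.length : Int) ((matrix.headD []).length : Int) q &&
          PySem.Set.contains (PySem.Set.ofList rc) q)
        = degc (matrix.length : Int) ((matrix.headD []).length : Int) rc p := by
      unfold degc nbrs
      apply List.countP_congr
      intro q _
      simp [PySem.Set.contains]
    rw [this]
    simp
  rw [PySem.List.foldl_append_ite_eq_filter]
  simp only [hinner, List.nil_append]
  apply List.filter_congr
  intro x _
  rw [decide_eq_decide]
  exact_mod_cast Iff.rfl

lemma remove_getD_cons_of_ne {x q : Int × Int} (h : q ≠ x) (xs : List (Int × Int)) :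
    ((PySem.List.remove? (x :: xs) q).getD (x :: xs)) = x :: ((PySem.List.remove? xs q).getD xs) := by
  rw [PySem.List.remove?_cons_of_ne xs (fun hx => h hx.symm)]
  cases hr : PySem.List.remove? xs q <;> simp

lemma remove_fold_cons (L : List (Int × Int)) (pr : (Int × Int) → Bool) (x : Int × Int)
    (hx : pr x = false) (hL : ∀ q ∈ L, pr q = true) (xs : List (Int × Int)) :
    L.foldl (fun l p => (PySem.List.remove? l p).getD l) (x :: xs)
      = x :: L.foldl (fun l p => (PySem.List.remove? l p).getD l) xs := by
  induction L generalizing xs with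
  | nil => rfl
  | cons q L ih =>
    have hq : pr q = true := hL q List.mem_cons_self
    have hne : q ≠ x := fun h => by rw [h, hx] at hq; cases hq
    simp only [List.foldl_cons]
    rw [remove_getD_cons_of_ne hne]
    exact ih (fun r hr => hL r (List.mem_cons_of_mem _ hr)) _

lemma remove_fold (rc : List (Int × Int)) (pr : (Int × Int) → Bool) :
    (rc.filter pr).foldl (fun l p => (PySem.List.remove? l p).getD l) rc
      = rc.filter (fun p => !pr p) := by
  induction rc with
  | nil => rfl
  | cons x xs ih =>
    by_cases hx : pr x
    · rw [List.filter_cons_of_pos hx]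
      simp only [List.foldl_cons, PySem.List.remove?_cons_self, Option.getD_some]
      rw [ih, List.filter_cons_of_neg (by simp [hx])]
    · rw [List.filter_cons_of_neg hx]
      rw [remove_fold_cons _ pr x (by simp [hx]) (fun q hq => (List.mem_filter.mp hq).2) xs]
      rw [ih, List.filter_cons_of_pos (by simp [hx])]

lemma a_fold_decompose (acc : List (Int × Int)) (m : List (List String))
    (rc : List (Int × Int)) (cnt : Int) :
    acc.foldl a_removal_step (m, rc, cnt)
      = (acc.foldl (fun m p => PySem.List.pySetD m p.1
            (PySem.List.pySetD ((PySem.List.pyGet? m p.1).getD []) p.2 ".")) m,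
         acc.foldl (fun l p => (PySem.List.remove? l p).getD l) rc,
         cnt + acc.length) := by
  induction acc generalizing m rc cnt with
  | nil => simp
  | cons x xs ih =>
    simp only [List.foldl_cons, ih, a_removal_step, List.length_cons]
    simp only [Prod.mk.injEq]
    refine ⟨trivial, trivial, by push_cast; ring⟩

lemma mark_step_lens (m : List (List String)) (x : Int × Int) :
    (PySem.List.pySetD m x.1
        (PySem.List.pySetD ((PySem.List.pyGet? m x.1).getD []) x.2 ".")).map List.length
      = m.map List.length := by
  cases hk : PySem.List.pyIdx? m.length x.1 with
  | none => simp [PySem.List.pySetD, PySem.List.pySet?, hk]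
  | some k =>
    have hklt : k < m.length := by
      simp only [PySem.List.pyIdx?] at hk
      split_ifs at hk with h1 h2 h3 <;> injection hk with hk' <;> omega
    have hget : (PySem.List.pyGet? m x.1).getD [] = m[k] := by
      simp [PySem.List.pyGet?, hk, List.getElem?_eq_getElem hklt]
    rw [hget]
    have h1 : PySem.List.pySetD m x.1 (PySem.List.pySetD m[k] x.2 ".")
        = m.set k (PySem.List.pySetD m[k] x.2 ".") := by
      simp [PySem.List.pySetD, PySem.List.pySet?, hk]
    rw [h1, List.map_set, PySem.List.length_pySetD]
    have h2 : m[k].length = (List.map List.length m)[k]'(by simpa using hklt) := by simp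
    rw [h2, List.set_getElem_self]

lemma mark_lens (acc : List (Int × Int)) (m : List (List String)) :
    (acc.foldl (fun m p => PySem.List.pySetD m p.1
        (PySem.List.pySetD ((PySem.List.pyGet? m p.1).getD []) p.2 ".")) m).map List.length
      = m.map List.length := by
  induction acc generalizing m with
  | nil => rfl
  | cons x xs ih =>
    simp only [List.foldl_cons]
    rw [ih, mark_step_lens]

lemma a_loop_spec (R C : Int) (fuel : Nat) : ∀ (m : List (List String))
    (rc : List (Int × Int)) (cnt : Int), rc.length < fuel →
    (m.length : Int) = R → ((m.headD []).length : Int) = C →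
    ∃ T pr, StarS R C rc T ∧ StableS R C T ∧ T = rc.filter pr ∧
      a_loop fuel m rc cnt = cnt + ((rc.length : Int) - (T.length : Int)) := by
  induction fuel with
  | zero => intro m rc cnt h; omega
  | succ f ih =>
    intro m rc cnt hf hR hC
    simp only [a_loop]
    rw [accessible_eq_filter m rc, hR, hC]
    set pr0 : (Int × Int) → Bool := fun p => decide (degc R C rc p < 4) with hpr0
    by_cases hacc : (rc.filter pr0).length > 0
    · rw [if_pos hacc, a_fold_decompose, remove_fold]
      set rc' := rc.filter (fun p => !pr0 p) with hrc'
      have hlens := mark_lens (rc.filter pr0) m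
      have hsplit : rc.length = (rc.filter pr0).length + rc'.length := by
        rw [hrc']; exact List.length_eq_length_filter_add pr0
      have hlt : rc'.length < rc.length := by omega
      obtain ⟨hl, hh⟩ := lens_head hlens
      obtain ⟨T, pr', hstar, hstable, hTeq, hval⟩ :=
        ih _ rc' _ (by omega) (by rw [hl]; exact hR) (by rw [hh]; exact hC)
      refine ⟨T, fun a => pr' a && !pr0 a, ?_, hstable, ?_, ?_⟩
      · refine Relation.ReflTransGen.head ⟨?_, ?_⟩ hstar
        · exact fun q hq => List.mem_of_mem_filter hq
        · intro x hx hnx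
          by_contra hge
          have : pr0 x = false := by simp [hpr0]; omega
          exact hnx (List.mem_filter.mpr ⟨hx, by simp [this]⟩)
      · rw [hTeq, hrc', List.filter_filter]
      · rw [hval]
        have hT : T.length ≤ rc'.length := by
          rw [hTeq]; exact List.length_filter_le _ _
        push_cast
        omega
    · rw [if_neg hacc]
      refine ⟨rc, fun _ => true, Relation.ReflTransGen.refl, ?_, by simp, by ring⟩
      intro p hp
      have : rc.filter pr0 = [] := List.length_eq_zero_iff.mp (by omega)
      have hnp : pr0 p = false := by
        by_contra h
        have : p ∈ rc.filter pr0 := List.mem_filter.mpr ⟨hp, by simpa using h⟩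
        simp [‹rc.filter pr0 = []›] at this
      simp only [hpr0, decide_eq_false_iff_not, not_lt] at hnp
      exact hnp

-- ---- B-side characterisation ----

-- the live/changed component of B's sweep, with the write-only matrix marking dropped
def b_step (rows cols : Int) (st : List (Int × Int) × Bool) (p : Int × Int) :
    List (Int × Int) × Bool :=
  let n : Int := b_dirs.foldl (fun n d =>
    if decide (0 ≤ p.1 + d.1) && decide (p.1 + d.1 < rows) && decide (0 ≤ p.2 + d.2) &&
        decide (p.2 + d.2 < cols) && st.1.contains (p.1 + d.1, p.2 + d.2) then n + 1 else n) 0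
  if n < 4 then (st.1.erase p, true) else st

def b_sweep_core (rows cols : Int) : Nat → List (Int × Int) → List (Int × Int)
  | 0, live => live
  | fuel + 1, live =>
    let st := live.foldl (b_step rows cols) (live, false)
    if st.2 then b_sweep_core rows cols fuel st.1 else st.1

lemma b_visit_fst (rows cols : Int) (st : (List (Int × Int) × Bool) × List (List String))
    (p : Int × Int) : (b_visit rows cols st p).1 = b_step rows cols st.1 p := by
  simp only [b_visit, b_step]
  split_ifs <;> rfl

lemma b_fold_fst (rows cols : Int) (snap : List (Int × Int)) :
    ∀ st : (List (Int × Int) × Bool) × List (List String),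
    (snap.foldl (b_visit rows cols) st).1 = snap.foldl (b_step rows cols) st.1 := by
  induction snap with
  | nil => intro st; rfl
  | cons p snap ih =>
    intro st
    rw [List.foldl_cons, List.foldl_cons, ih, b_visit_fst]

lemma b_sweep_fst (rows cols : Int) (fuel : Nat) : ∀ (live : List (Int × Int))
    (m : List (List String)),
    (b_sweep rows cols fuel live m).1 = b_sweep_core rows cols fuel live := by
  induction fuel with
  | zero => intro live m; rfl
  | succ f ih =>
    intro live m
    simp only [b_sweep, b_sweep_core]
    rw [b_fold_fst rows cols live ((live, false), m)]
    by_cases h : (live.foldl (b_step rows cols) (live, false)).2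
    · rw [if_pos h, if_pos h, ih]
    · rw [if_neg h, if_neg h]

lemma b_step_count (rows cols : Int) (cur : List (Int × Int)) (p : Int × Int) :
    (b_dirs.foldl (fun n d =>
      if decide (0 ≤ p.1 + d.1) && decide (p.1 + d.1 < rows) && decide (0 ≤ p.2 + d.2) &&
          decide (p.2 + d.2 < cols) && cur.contains (p.1 + d.1, p.2 + d.2)
      then n + 1 else n) (0 : Int)) = (degc rows cols cur p : Int) := by
  simp only [PySem.List.foldl_if_add_one (fun d : Int × Int =>
    decide (0 ≤ p.1 + d.1) && decide (p.1 + d.1 < rows) && decide (0 ≤ p.2 + d.2) &&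
      decide (p.2 + d.2 < cols) && cur.contains (p.1 + d.1, p.2 + d.2))]
  have hmap : nbrs p = b_dirs.map (fun d => (p.1 + d.1, p.2 + d.2)) := by
    simp [nbrs, get_adjacent_positions, b_dirs]
    norm_num [sub_eq_add_neg]
  have : degc rows cols cur p = List.countP (fun d : Int × Int =>
      decide (0 ≤ p.1 + d.1) && decide (p.1 + d.1 < rows) && decide (0 ≤ p.2 + d.2) &&
        decide (p.2 + d.2 < cols) && cur.contains (p.1 + d.1, p.2 + d.2)) b_dirs := by
    rw [degc, hmap, List.countP_map]
    apply List.countP_congr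
    intro d _
    simp only [Function.comp_apply]
    by_cases hm : (p.1 + d.1, p.2 + d.2) ∈ cur
    · rw [Bool.eq_iff_iff]
      simp [hm, validRC]
      omega
    · simp [hm]
  rw [this]
  simp

lemma b_pass (rows cols : Int) (snap : List (Int × Int)) :
    ∀ (cur : List (Int × Int)) (ch : Bool),
    cur.Nodup → snap.Nodup → (∀ q ∈ snap, q ∈ cur) →
    StarS rows cols cur (snap.foldl (b_step rows cols) (cur, ch)).1 ∧
    (snap.foldl (b_step rows cols) (cur, ch)).1.Nodup ∧
    (snap.foldl (b_step rows cols) (cur, ch)).1.length ≤ cur.length ∧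
    (ch = true → (snap.foldl (b_step rows cols) (cur, ch)).2 = true) ∧
    ((snap.foldl (b_step rows cols) (cur, ch)).2 = ch ∨
      (snap.foldl (b_step rows cols) (cur, ch)).1.length < cur.length) ∧
    ((snap.foldl (b_step rows cols) (cur, ch)).2 = false →
      (snap.foldl (b_step rows cols) (cur, ch)).1 = cur ∧
        ∀ p ∈ snap, ¬ degc rows cols cur p < 4) := by
  induction snap with
  | nil =>
    intro cur ch hnd _ _
    exact ⟨Relation.ReflTransGen.refl, hnd, le_rfl, fun h => h, Or.inl rfl,
      fun _ => ⟨rfl, by simp⟩⟩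
  | cons p snap ih =>
    intro cur ch hnd hsnd hcov
    have hpcur : p ∈ cur := hcov p List.mem_cons_self
    simp only [List.foldl_cons]
    by_cases hdeg : degc rows cols cur p < 4
    · have hvis : b_step rows cols (cur, ch) p = (cur.erase p, true) := by
        simp only [b_step, b_step_count]
        rw [if_pos (by exact_mod_cast hdeg)]
      rw [hvis]
      have hstep : StepS rows cols cur (cur.erase p) := by
        constructor
        · exact fun q hq => List.mem_of_mem_erase hq
        · intro x hx hnx
          have hxp : x = p := by
            by_contra hne
            exact hnx ((List.Nodup.mem_erase_iff hnd).mpr ⟨hne, hx⟩)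
          rw [hxp]; exact hdeg
      have hlen : (cur.erase p).length < cur.length := by
        rw [List.length_erase_of_mem hpcur]
        have : 0 < cur.length := List.length_pos_of_mem hpcur
        omega
      obtain ⟨s1, s2, s3, s4, _, s6⟩ := ih (cur.erase p) true (hnd.erase p)
        (List.Nodup.of_cons hsnd)
        (fun q hq => (List.Nodup.mem_erase_iff hnd).mpr
          ⟨fun h => (List.nodup_cons.mp hsnd).1 (h ▸ hq), hcov q (List.mem_cons_of_mem _ hq)⟩)
      refine ⟨Relation.ReflTransGen.head hstep s1, s2, by omega, fun _ => s4 rfl, ?_, ?_⟩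
      · right; omega
      · intro hfalse
        exact absurd (s4 rfl) (by rw [hfalse]; simp)
    · have hvis : b_step rows cols (cur, ch) p = (cur, ch) := by
        simp only [b_step, b_step_count]
        rw [if_neg (by exact_mod_cast hdeg)]
      rw [hvis]
      obtain ⟨s1, s2, s3, s4, s5, s6⟩ := ih cur ch hnd (List.Nodup.of_cons hsnd)
        (fun q hq => hcov q (List.mem_cons_of_mem _ hq))
      refine ⟨s1, s2, s3, s4, s5, ?_⟩
      intro hfalse
      obtain ⟨h1, h2⟩ := s6 hfalse
      exact ⟨h1, by
        intro q hq
        rcases List.mem_cons.mp hq with h | h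
        · rw [h]; exact hdeg
        · exact h2 q h⟩

lemma b_sweep_core_spec (rows cols : Int) (fuel : Nat) : ∀ live : List (Int × Int), live.Nodup →
    live.length < fuel →
    StarS rows cols live (b_sweep_core rows cols fuel live) ∧
      StableS rows cols (b_sweep_core rows cols fuel live) := by
  induction fuel with
  | zero => intro live _ h; omega
  | succ f ih =>
    intro live hnd hlen
    simp only [b_sweep_core]
    obtain ⟨s1, s2, s3, _, s5, s6⟩ := b_pass rows cols live live false hnd hnd (fun q hq => hq)
    by_cases hch : (live.foldl (b_step rows cols) (live, false)).2
    · rw [if_pos hch]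
      have hlt : (live.foldl (b_step rows cols) (live, false)).1.length < live.length := by
        rcases s5 with h | h
        · rw [hch] at h; cases h
        · exact h
      obtain ⟨t1, t2⟩ := ih _ s2 (by omega)
      exact ⟨Relation.ReflTransGen.trans s1 t1, t2⟩
    · rw [if_neg hch]
      obtain ⟨h1, h2⟩ := s6 (by simpa using hch)
      rw [h1]
      exact ⟨Relation.ReflTransGen.refl, fun p hp => by have := h2 p hp; omega⟩

lemma b_count_fold (T rc : List (Int × Int)) :
    rc.foldl (fun s p => if T.contains p then s else s + 1) (0 : Int)
      = (rc.countP (fun p => !T.contains p) : Int) := by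
  have hfun : (fun (s : Int) (p : Int × Int) => if T.contains p then s else s + 1)
      = (fun (s : Int) (p : Int × Int) => if (fun p => !T.contains p) p then s + 1 else s) := by
    funext s p
    cases h : T.contains p <;> simp only [h] <;> rfl
  rw [hfun]
  simp only [PySem.List.foldl_if_add_one (fun p : Int × Int => !T.contains p)]
  simp

-- ---- assembly ----

lemma main_equiv (matrix : List (List String)) (roll_coords : List (Int × Int)) :
    get_total_possible_accessible_rolls_removed matrix roll_coords
      = get_total_possible_accessible_rolls_removed_alt matrix roll_coords := by
  obtain ⟨TA, pr, hstarA, hstabA, hTAeq, hvalA⟩ :=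
    a_loop_spec (matrix.length : Int) ((matrix.headD []).length : Int)
      (roll_coords.length + 1) matrix roll_coords 0 (by omega) rfl rfl
  have hnd : (PySem.List.dedup roll_coords).Nodup := PySem.List.nodup_dedup roll_coords
  have hdlen : (PySem.List.dedup roll_coords).length ≤ roll_coords.length := by
    rw [PySem.List.dedup_eq_ofList]
    exact PySem.Set.length_ofList_le roll_coords
  obtain ⟨hstarB, hstabB⟩ :=
    b_sweep_core_spec (matrix.length : Int) ((matrix.headD []).length : Int)
      (roll_coords.length + 1) (PySem.List.dedup roll_coords) hnd (by omega)
  set TB := b_sweep_core (matrix.length : Int) ((matrix.headD []).length : Int)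
    (roll_coords.length + 1) (PySem.List.dedup roll_coords) with hTB
  have hcore : ∀ q, q ∈ TA ↔ q ∈ TB :=
    core_unique (fun q => (PySem.List.mem_dedup roll_coords q).symm) hstarA hstabA hstarB hstabB
  have hTAlen : TA.length = roll_coords.countP (fun p => decide (p ∈ TB)) := by
    rw [hTAeq, ← List.countP_eq_length_filter]
    apply List.countP_congr
    intro x hx
    have hmem : x ∈ TA ↔ pr x = true := by rw [hTAeq]; simp [hx]
    simp only [decide_eq_true_eq]
    rw [← hcore x]
    exact hmem.symm
  have hcnt1 : roll_coords.countP (fun p => TB.contains p)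
      = roll_coords.countP (fun p => decide (p ∈ TB)) := by
    apply List.countP_congr
    intro x _
    simp
  have hsplit : roll_coords.countP (fun p => !TB.contains p)
      + roll_coords.countP (fun p => TB.contains p) = roll_coords.length := by
    rw [List.countP_eq_length_filter, List.countP_eq_length_filter]
    have := List.length_eq_length_filter_add (l := roll_coords) (fun p => TB.contains p)
    omega
  have hle : roll_coords.countP (fun p => decide (p ∈ TB)) ≤ roll_coords.length :=
    List.countP_le_length
  have hBcnt := b_count_fold TB roll_coords
  simp only [get_total_possible_accessible_rolls_removed,
    get_total_possible_accessible_rolls_removed_alt]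
  rw [hvalA, b_sweep_fst, ← hTB, hBcnt, hTAlen]
  omega

-- ===== VERDICT (by name: the statement is the Claim_ definition above) =====
theorem get_total_possible_accessible_rolls_removed_spec : Claim_equal_get_total_possible_accessible_rolls_removed := by
  intro matrix roll_coords _ _
  unfold Spec_get_total_possible_accessible_rolls_removed
  exact main_equiv matrix roll_coords
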